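-- pv_equiv track=rewrite | github.com/jtprogru/interview-task | tasks/task0026.py | solution
-- ===== SOURCE A (Python) =====
-- def solution(s: str) -> dict:
--     from collections import defaultdict
--
--     max_seq_of_uniq_symbols = defaultdict(int)
--
--     if len(s) == 0:
--         return {}
--
--     prev_symbol = s[0]
--     seq_count = 0
--     for symbol in s:
--         if prev_symbol == symbol:
--             seq_count += 1
--         if seq_count > max_seq_of_uniq_symbols[prev_symbol]:
--             max_seq_of_uniq_symbols[prev_symbol] = seq_count
--         if prev_symbol != symbol:
--             seq_count = 1
--             prev_symbol = symbol
--
--             if max_seq_of_uniq_symbols[symbol] == 0: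
--                 max_seq_of_uniq_symbols[symbol] = 1
--
--     return max_seq_of_uniq_symbols
-- ===== SOURCE B (Python) =====
-- def solution(s: str) -> dict:
--     from collections import defaultdict
--
--     result = defaultdict(int)
--     for ch in s:
--         if ch not in result:
--             k = 1
--             while ch * (k + 1) in s:
--                 k += 1
--             result[ch] = k
--     return result
-- ===== Notes on version B (the rewrite author's own statement) =====
-- stated objective: alternative
-- what changed: B drops A's running prev/count state machine entirely: for each character at its first occurrence it finds the longest uniform run by substring search, growing k while ch*(k+1) is a substring of s.
import Mathlib
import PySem

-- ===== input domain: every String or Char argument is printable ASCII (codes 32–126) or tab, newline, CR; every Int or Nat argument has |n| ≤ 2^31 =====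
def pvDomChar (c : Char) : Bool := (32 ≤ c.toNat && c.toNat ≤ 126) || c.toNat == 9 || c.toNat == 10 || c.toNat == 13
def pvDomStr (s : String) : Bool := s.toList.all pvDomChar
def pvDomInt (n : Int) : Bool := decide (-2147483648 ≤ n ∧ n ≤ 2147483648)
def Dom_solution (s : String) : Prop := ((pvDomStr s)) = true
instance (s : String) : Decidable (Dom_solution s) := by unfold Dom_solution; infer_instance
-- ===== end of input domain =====

-- B drops A's running prev/count state machine: for each character at its first occurrence it
-- finds the longest uniform run by substring search ('ch*(k+1) in s'); alternative algorithm,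
-- same return value.


-- ===== PORT A =====
-- one loop iteration of A; defaultdict access d[k] is modelled exactly as setdefault k 0 then getD
def pvStepA (st : PySem.Dict Char Int × Char × Int) (sym : Char) :
    PySem.Dict Char Int × Char × Int :=
  let d := st.1
  let prev := st.2.1
  let cnt0 := st.2.2
  let cnt := if prev == sym then cnt0 + 1 else cnt0
  let d := d.setdefault prev 0
  let d := if cnt > d.getD prev 0 then d.insert prev cnt else d
  if prev != sym then
    let d := d.setdefault sym 0
    let d := if d.getD sym 0 == 0 then d.insert sym 1 else d
    (d, sym, 1)
  else
    (d, prev, cnt)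

def solution (s : String) : List (String × Int) :=
  match s.toList with
  | [] => []
  | c :: _ =>
      ((s.toList.foldl pvStepA (PySem.Dict.empty, c, 0)).1).items.map
        (fun p => (String.mk [p.1], p.2))

-- ===== PORT B =====
-- the while loop 'while ch*(k+1) in s: k += 1'; 'ch*(k+1) in s' is PySem.Chars.isIn of a replicate
def pvGrow (l : List Char) (c : Char) (k : Nat) : Nat :=
  if h : PySem.Chars.isIn (List.replicate (k + 1) c) l = true then pvGrow l c (k + 1) else k
termination_by l.length - k
decreasing_by
  have hinf := (PySem.Chars.isIn_iff_infix _ _).mp h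
  have hlen := hinf.length_le
  simp only [List.length_replicate] at hlen
  omega

-- 'if ch not in result: ... result[ch] = k'
def pvStepC (l : List Char) (d : PySem.Dict Char Int) (c : Char) : PySem.Dict Char Int :=
  if d.contains c then d else d.insert c ((pvGrow l c 1 : Nat) : Int)

def solution_alt (s : String) : List (String × Int) :=
  (s.toList.foldl (pvStepC s.toList) PySem.Dict.empty).items.map
    (fun p => (String.mk [p.1], p.2))

-- ===== PRECONDITION & SPEC =====
def Spec_solution (s : String) (out : List (String × Int)) : Prop := out = solution_alt s
instance (s : String) (out : List (String × Int)) : Decidable (Spec_solution s out) := by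
  unfold Spec_solution; infer_instance

-- ===== CLAIM (what is proved, stated in full; the proofs are below) =====
def Claim_equal_solution : Prop := ∀ (s : String), Dom_solution s → Spec_solution s (solution s)

-- ===== LEMMAS AND PROOFS =====

-- proof-side intermediate: the maximal runs of a list, and a max-update fold over them.
def pvRuns : List Char → List (Char × Int)
  | [] => []
  | c :: rest =>
      (c, ((rest.takeWhile (· == c)).length : Int) + 1) :: pvRuns (rest.dropWhile (· == c))
termination_by l => l.length
decreasing_by
  simp only [List.length_cons]
  exact Nat.lt_succ_of_le (List.length_dropWhile_le _ _)

def pvStepB (d : PySem.Dict Char Int) (p : Char × Int) : PySem.Dict Char Int :=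
  if p.2 > d.getD p.1 0 then d.insert p.1 p.2 else d

theorem pvRuns_nil : pvRuns [] = [] := by simp [pvRuns]

-- running maximum of the values attached to key c, starting from i
def pvMaxFrom (c : Char) (i : Int) (ps : List (Char × Int)) : Int :=
  ps.foldl (fun m p => if p.1 = c then max m p.2 else m) i

-- ---- A-side: the state machine equals the max-update fold over the runs ----

def pvInv (d : PySem.Dict Char Int) : Prop :=
  ∀ c : Char, d.contains c = true → 1 ≤ d.getD c 0

theorem pvInv_empty : pvInv (PySem.Dict.empty : PySem.Dict Char Int) := by
  intro c hc; simp [PySem.Dict.contains_empty] at hc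

theorem pvInv_insert {d : PySem.Dict Char Int} {c : Char} {v : Int}
    (h : pvInv d) (hv : 1 ≤ v) : pvInv (d.insert c v) := by
  intro k hk
  rw [PySem.Dict.getD_insert]
  split_ifs with he
  · exact hv
  · rw [PySem.Dict.contains_insert] at hk
    have : (k == c) = false := by simp [he]
    simp [this] at hk
    exact h k hk

theorem pvInv_stepB {d : PySem.Dict Char Int} {c : Char} {v : Int}
    (h : pvInv d) (hv : 1 ≤ v) : pvInv (pvStepB d (c, v)) := by
  unfold pvStepB
  dsimp only
  split_ifs with hgt
  · exact pvInv_insert h hv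
  · exact h

theorem pv_contains_stepB {d : PySem.Dict Char Int} {c : Char} (v : Int) {k : Char}
    (h : d.contains k = true) : (pvStepB d (c, v)).contains k = true := by
  unfold pvStepB
  dsimp only
  split_ifs
  · rw [PySem.Dict.contains_insert, h]; simp
  · exact h

theorem pv_getD_stepB_self (d : PySem.Dict Char Int) (c : Char) (v : Int) :
    (pvStepB d (c, v)).getD c 0 = max (d.getD c 0) v := by
  unfold pvStepB
  dsimp only
  split_ifs with hgt
  · rw [PySem.Dict.getD_insert_self]; omega
  · omega

theorem pv_stepB_stepB {d : PySem.Dict Char Int} {c : Char} {a b : Int} (hab : a ≤ b) :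
    pvStepB (pvStepB d (c, a)) (c, b) = pvStepB d (c, b) := by
  unfold pvStepB
  dsimp only
  by_cases h1 : a > d.getD c 0
  · simp only [h1, if_pos]
    rw [PySem.Dict.getD_insert_self]
    by_cases h2 : b > a
    · have : b > d.getD c 0 := by omega
      simp [h2, this, PySem.Dict.insert_insert_self]
    · have hba : b = a := by omega
      simp [hba, h1]
  · simp [h1]

theorem pv_stepB_insert_one {d : PySem.Dict Char Int} {c : Char} {m : Int}
    (hc : d.contains c = false) (hm : 1 ≤ m) :
    pvStepB (d.insert c 1) (c, m) = pvStepB d (c, m) := by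
  unfold pvStepB
  have hg : d.getD c 0 = 0 := PySem.Dict.getD_of_not_contains d 0 hc
  rw [PySem.Dict.getD_insert_self, hg]
  dsimp only
  by_cases h2 : m > 1
  · have hm0 : m > 0 := by omega
    simp [h2, hm0, PySem.Dict.insert_insert_self]
  · have h1 : m = 1 := by omega
    simp [h1]

theorem pv_stepA_same (d : PySem.Dict Char Int) (prev : Char) (cnt : Int)
    (hc : d.contains prev = true) :
    pvStepA (d, prev, cnt) prev = (pvStepB d (prev, cnt + 1), prev, cnt + 1) := by
  unfold pvStepA pvStepB
  dsimp only
  simp [PySem.Dict.setdefault_of_contains _ _ hc]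

theorem pv_stepA_new (d : PySem.Dict Char Int) (prev sym : Char) (cnt : Int)
    (hne : sym ≠ prev) (hc : d.contains prev = true) (hle : cnt ≤ d.getD prev 0)
    (hinv : pvInv d) :
    pvStepA (d, prev, cnt) sym =
      ((if d.contains sym then d else d.insert sym 1), sym, 1) := by
  unfold pvStepA
  have hps : (prev == sym) = false := by
    simp only [beq_eq_false_iff_ne]
    exact fun h => hne h.symm
  have hngt : ¬ cnt > d.getD prev 0 := by omega
  simp only [hps, if_false, Bool.false_eq_true, PySem.Dict.setdefault_of_contains _ _ hc,
    bne, Bool.not_false, if_true, if_neg hngt]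
  by_cases hs : d.contains sym = true
  · have h1 : (1 : Int) ≤ d.getD sym 0 := hinv sym hs
    have hnz : ¬ d.getD sym 0 = 0 := by omega
    rw [PySem.Dict.setdefault_of_contains _ _ hs]
    simp [hs, hnz]
  · have hs' : d.contains sym = false := by simpa using hs
    rw [PySem.Dict.setdefault_of_not_contains _ _ hs']
    simp [hs', PySem.Dict.getD_insert_self, PySem.Dict.insert_insert_self]

theorem pv_run (k : Nat) : ∀ (d : PySem.Dict Char Int) (prev : Char) (cnt : Int),
    d.contains prev = true → cnt ≤ d.getD prev 0 →
    (List.replicate k prev).foldl pvStepA (d, prev, cnt) =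
      (pvStepB d (prev, cnt + k), prev, cnt + k) := by
  induction k with
  | zero =>
      intro d prev cnt hc hle
      simp only [List.replicate, List.foldl_nil, Nat.cast_zero, add_zero]
      unfold pvStepB
      dsimp only
      rw [if_neg (by omega : ¬ cnt > d.getD prev 0)]
  | succ k ih =>
      intro d prev cnt hc hle
      rw [List.replicate_succ, List.foldl_cons, pv_stepA_same d prev cnt hc]
      rw [ih (pvStepB d (prev, cnt + 1)) prev (cnt + 1)
        (by
          unfold pvStepB
          split_ifs
          · exact PySem.Dict.contains_insert_self _ _ _
          · exact hc)
        (by rw [pv_getD_stepB_self]; omega)]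
      have harith : cnt + 1 + (k : Int) = cnt + ((k : Nat) + 1 : Nat) := by push_cast; ring
      rw [harith, pv_stepB_stepB (by omega : cnt + 1 ≤ cnt + ((k : Nat) + 1 : Nat))]

theorem pv_takeWhile_replicate (l : List Char) (c : Char) :
    l.takeWhile (· == c) = List.replicate (l.takeWhile (· == c)).length c := by
  rw [List.eq_replicate_iff]
  refine ⟨rfl, ?_⟩
  intro b hb
  simpa using List.mem_takeWhile_imp hb

theorem pv_dropWhile_head : ∀ {l r : List Char} {p : Char → Bool} {c : Char},
    l.dropWhile p = c :: r → p c = false := by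
  intro l
  induction l with
  | nil => intro r p c h; simp [List.dropWhile] at h
  | cons a l ih =>
      intro r p c h
      rw [List.dropWhile_cons] at h
      by_cases hp : p a = true
      · exact ih (by simpa [hp] using h)
      · have hp' : p a = false := by simpa using hp
        rw [hp'] at h
        simp only [Bool.false_eq_true, if_false] at h
        injection h with h1 h2
        exact h1 ▸ hp'

theorem pv_main (n : Nat) : ∀ (l : List Char) (d : PySem.Dict Char Int) (prev : Char),
    l.length ≤ n → pvInv d → d.contains prev = true → 1 ≤ d.getD prev 0 →
    (l.foldl pvStepA (d, prev, 1)).1 = (pvRuns (prev :: l)).foldl pvStepB d := by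
  induction n with
  | zero =>
      intro l d prev hlen hinv hc h1
      have hl : l = [] := List.eq_nil_of_length_eq_zero (by omega)
      subst hl
      simp only [pvRuns, List.takeWhile_nil, List.dropWhile_nil, List.length_nil,
        List.foldl_nil, List.foldl_cons, Nat.cast_zero, zero_add]
      unfold pvStepB
      dsimp only
      rw [if_neg (by omega : ¬ (1:Int) > d.getD prev 0)]
  | succ n ih =>
      intro l d prev hlen hinv hc h1
      set t := l.takeWhile (· == prev) with ht
      set r := l.dropWhile (· == prev) with hr
      have hsplit : l = t ++ r := (List.takeWhile_append_dropWhile).symm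
      have hrun := pv_run t.length d prev 1 hc h1
      have htrep : t = List.replicate t.length prev := pv_takeWhile_replicate l prev
      have hfold_t : t.foldl pvStepA (d, prev, 1) =
          (pvStepB d (prev, 1 + (t.length : Int)), prev, 1 + (t.length : Int)) := by
        conv_lhs => rw [htrep]
        exact hrun
      have hruns : pvRuns (prev :: l) =
          (prev, (t.length : Int) + 1) :: pvRuns r := by
        simp only [pvRuns, ← ht, ← hr]
      have harith : (1 : Int) + t.length = (t.length : Int) + 1 := by ring
      set D1 := pvStepB d (prev, (t.length : Int) + 1) with hD1
      have hD1inv : pvInv D1 := pvInv_stepB hinv (by omega)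
      have hD1c : D1.contains prev = true := pv_contains_stepB _ hc
      have hD1g : (t.length : Int) + 1 ≤ D1.getD prev 0 := by
        rw [hD1, pv_getD_stepB_self]; omega
      rw [hruns, List.foldl_cons, ← hD1]
      conv_lhs => rw [hsplit]
      rw [List.foldl_append, hfold_t, harith, ← hD1]
      match hr' : r with
      | [] => simp [pvRuns]
      | c :: r' =>
          have hd : List.dropWhile (fun x => x == prev) l = c :: r' := hr.symm
          have hcprev : (c == prev) = false := by
            have := pv_dropWhile_head hd
            simpa using this
          have hne : c ≠ prev := by simpa using hcprev
          rw [List.foldl_cons,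
            pv_stepA_new D1 prev c ((t.length : Int) + 1) hne hD1c hD1g hD1inv]
          have hlenr : r'.length ≤ n := by
            have h2 := List.length_dropWhile_le (fun x => x == prev) l
            rw [hd] at h2
            simp only [List.length_cons] at h2
            omega
          by_cases hcs : D1.contains c = true
          · simp only [hcs, if_true]
            exact ih r' D1 c hlenr hD1inv hcs (hD1inv c hcs)
          · have hcs' : D1.contains c = false := by simpa using hcs
            simp only [hcs', Bool.false_eq_true, if_false]
            rw [ih r' (D1.insert c 1) c hlenr (pvInv_insert hD1inv le_rfl)
              (PySem.Dict.contains_insert_self _ _ _)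
              (by rw [PySem.Dict.getD_insert_self])]
            simp only [pvRuns, List.foldl_cons]
            rw [pv_stepB_insert_one hcs' (by omega)]

-- A's whole dict, reduced to the max-update fold over the runs
theorem pvA_dict (c : Char) (rest : List Char) :
    ((c :: rest).foldl pvStepA (PySem.Dict.empty, c, 0)).1 =
      (pvRuns (c :: rest)).foldl pvStepB PySem.Dict.empty := by
  have hstep1 : pvStepA (PySem.Dict.empty, c, 0) c =
      ((PySem.Dict.empty : PySem.Dict Char Int).insert c 1, c, 1) := by
    unfold pvStepA
    simp [PySem.Dict.setdefault_of_not_contains _ _ (PySem.Dict.contains_empty c),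
      PySem.Dict.getD_insert_self, PySem.Dict.insert_insert_self]
  rw [List.foldl_cons, hstep1]
  rw [pv_main rest.length rest _ c le_rfl
    (pvInv_insert pvInv_empty le_rfl)
    (PySem.Dict.contains_insert_self _ _ _)
    (by rw [PySem.Dict.getD_insert_self])]
  simp only [pvRuns, List.foldl_cons]
  rw [pv_stepB_insert_one (PySem.Dict.contains_empty c) (by omega)]

-- ---- pvMaxFrom toolbox ----

theorem pvMaxFrom_cons (c : Char) (i : Int) (p : Char × Int) (ps : List (Char × Int)) :
    pvMaxFrom c i (p :: ps) = pvMaxFrom c (if p.1 = c then max i p.2 else i) ps := rfl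

theorem pvMaxFrom_max (c : Char) : ∀ (ps : List (Char × Int)) (i j : Int),
    pvMaxFrom c (max i j) ps = max i (pvMaxFrom c j ps) := by
  intro ps
  induction ps with
  | nil => intro i j; rfl
  | cons p ps ih =>
      intro i j
      rw [pvMaxFrom_cons, pvMaxFrom_cons]
      by_cases h : p.1 = c
      · rw [if_pos h, if_pos h, max_assoc]
        exact ih i (max j p.2)
      · rw [if_neg h, if_neg h]
        exact ih i j

theorem pvMaxFrom_init_le (c : Char) : ∀ (ps : List (Char × Int)) (i : Int),
    i ≤ pvMaxFrom c i ps := by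
  intro ps
  induction ps with
  | nil => intro i; exact le_rfl
  | cons p ps ih =>
      intro i
      rw [pvMaxFrom_cons]
      refine le_trans ?_ (ih _)
      split_ifs
      · exact le_max_left _ _
      · exact le_rfl

theorem pv_le_maxFrom_of_mem (c : Char) : ∀ (ps : List (Char × Int)) (i : Int)
    (p : Char × Int), p ∈ ps → p.1 = c → p.2 ≤ pvMaxFrom c i ps := by
  intro ps
  induction ps with
  | nil => intro i p hp; exact absurd hp (List.not_mem_nil)
  | cons q ps ih =>
      intro i p hp hpc
      rcases List.mem_cons.mp hp with h | h
      · subst h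
        rw [pvMaxFrom_cons, if_pos hpc]
        exact le_trans (le_max_right _ _) (pvMaxFrom_init_le c ps _)
      · rw [pvMaxFrom_cons]
        exact ih _ p h hpc

theorem pvMaxFrom_attained (c : Char) : ∀ (ps : List (Char × Int)) (i : Int),
    pvMaxFrom c i ps = i ∨ ∃ p ∈ ps, p.1 = c ∧ pvMaxFrom c i ps = p.2 := by
  intro ps
  induction ps with
  | nil => intro i; exact Or.inl rfl
  | cons q ps ih =>
      intro i
      rw [pvMaxFrom_cons]
      by_cases hq : q.1 = c
      · rw [if_pos hq]
        rcases ih (max i q.2) with h | ⟨p, hp, hpc, hv⟩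
        · by_cases hiq : q.2 ≤ i
          · left; rw [h]; omega
          · right
            exact ⟨q, List.mem_cons_self, hq, by rw [h]; omega⟩
        · exact Or.inr ⟨p, List.mem_cons_of_mem _ hp, hpc, hv⟩
      · rw [if_neg hq]
        rcases ih i with h | ⟨p, hp, hpc, hv⟩
        · exact Or.inl h
        · exact Or.inr ⟨p, List.mem_cons_of_mem _ hp, hpc, hv⟩

-- ---- dict-shape lemmas for the two folds ----

theorem pv_getD_stepB (d : PySem.Dict Char Int) (k : Char) (v : Int) (c : Char) :
    (pvStepB d (k, v)).getD c 0 = if k = c then max (d.getD c 0) v else d.getD c 0 := by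
  by_cases hkc : k = c
  · subst hkc
    rw [if_pos rfl, pv_getD_stepB_self]
  · rw [if_neg hkc]
    unfold pvStepB
    dsimp only
    split_ifs with h1
    · rw [PySem.Dict.getD_insert, if_neg (fun h => hkc h.symm)]
    · rfl

theorem pv_getD_foldB : ∀ (ps : List (Char × Int)) (d : PySem.Dict Char Int) (c : Char),
    (ps.foldl pvStepB d).getD c 0 = pvMaxFrom c (d.getD c 0) ps := by
  intro ps
  induction ps with
  | nil => intro d c; rfl
  | cons p ps ih =>
      intro d c
      obtain ⟨k, v⟩ := p
      rw [List.foldl_cons, ih, pvMaxFrom_cons, pv_getD_stepB]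

theorem pv_keys_foldB : ∀ (ps : List (Char × Int)) (d : PySem.Dict Char Int),
    (∀ p ∈ ps, 1 ≤ p.2) →
    (ps.foldl pvStepB d).keys = PySem.Set.update d.keys (ps.map Prod.fst) := by
  intro ps
  induction ps with
  | nil => intro d _; rfl
  | cons p ps ih =>
      intro d hpos
      obtain ⟨k, v⟩ := p
      rw [List.foldl_cons, ih _ (fun q hq => hpos q (List.mem_cons_of_mem _ hq)),
        List.map_cons, PySem.Set.update_cons]
      congr 1
      by_cases hc : d.contains k = true
      · rw [PySem.Set.add_of_mem ((PySem.Dict.contains_iff_mem_keys _ _).mp hc)]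
        unfold pvStepB
        dsimp only
        split_ifs with h1
        · exact PySem.Dict.keys_insert_of_contains _ _ hc
        · rfl
      · have hc' : d.contains k = false := by simpa using hc
        have hg : d.getD k 0 = 0 := PySem.Dict.getD_of_not_contains d 0 hc'
        have hv : 1 ≤ v := hpos (k, v) List.mem_cons_self
        unfold pvStepB
        dsimp only
        rw [if_pos (by omega), PySem.Dict.keys_insert_of_not_contains _ _ hc',
          PySem.Set.add_of_not_mem
            (fun hm => by rw [(PySem.Dict.contains_iff_mem_keys _ _).mpr hm] at hc'; exact absurd hc' (by simp))]

theorem pv_nodup_foldB : ∀ (ps : List (Char × Int)) (d : PySem.Dict Char Int),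
    d.keys.Nodup → (ps.foldl pvStepB d).keys.Nodup := by
  intro ps
  induction ps with
  | nil => intro d h; exact h
  | cons p ps ih =>
      intro d h
      rw [List.foldl_cons]
      refine ih _ ?_
      unfold pvStepB
      split_ifs
      · exact PySem.Dict.nodup_keys_insert _ _ _ h
      · exact h

theorem pv_keys_foldC (L : List Char) : ∀ (l : List Char) (d : PySem.Dict Char Int),
    (l.foldl (pvStepC L) d).keys = PySem.Set.update d.keys l := by
  intro l
  induction l with
  | nil => intro d; rfl
  | cons k l ih =>
      intro d
      rw [List.foldl_cons, ih, PySem.Set.update_cons]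
      congr 1
      unfold pvStepC
      by_cases hc : d.contains k = true
      · rw [if_pos hc, PySem.Set.add_of_mem ((PySem.Dict.contains_iff_mem_keys _ _).mp hc)]
      · have hc' : d.contains k = false := by simpa using hc
        rw [if_neg (by simp [hc']), PySem.Dict.keys_insert_of_not_contains _ _ hc',
          PySem.Set.add_of_not_mem
            (fun hm => by rw [(PySem.Dict.contains_iff_mem_keys _ _).mpr hm] at hc'; exact absurd hc' (by simp))]

theorem pv_nodup_foldC (L : List Char) : ∀ (l : List Char) (d : PySem.Dict Char Int),
    d.keys.Nodup → (l.foldl (pvStepC L) d).keys.Nodup := by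
  intro l
  induction l with
  | nil => intro d h; exact h
  | cons k l ih =>
      intro d h
      rw [List.foldl_cons]
      refine ih _ ?_
      unfold pvStepC
      split_ifs
      · exact h
      · exact PySem.Dict.nodup_keys_insert _ _ _ h

theorem pv_stepC_contains (L : List Char) (d : PySem.Dict Char Int) (k c : Char) :
    (pvStepC L d k).contains c = (d.contains c || decide (c = k)) := by
  unfold pvStepC
  split_ifs with h
  · by_cases hck : c = k
    · subst hck; simp [h]
    · simp [hck]
  · rw [PySem.Dict.contains_insert]
    by_cases hck : c = k <;> simp [hck, Bool.or_comm]

theorem pv_stepC_getD (L : List Char) (d : PySem.Dict Char Int) (k c : Char) :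
    (pvStepC L d k).getD c 0 =
      if d.contains c = false ∧ c = k then ((pvGrow L c 1 : Nat) : Int)
      else d.getD c 0 := by
  unfold pvStepC
  by_cases h : d.contains k = true
  · rw [if_pos h, if_neg (by rintro ⟨h1, rfl⟩; rw [h] at h1; cases h1)]
  · have h' : d.contains k = false := by simpa using h
    rw [if_neg (by simp [h']), PySem.Dict.getD_insert]
    by_cases hck : c = k
    · subst hck
      rw [if_pos rfl, if_pos ⟨h', rfl⟩]
    · rw [if_neg hck, if_neg (by rintro ⟨_, h2⟩; exact hck h2)]

theorem pv_getD_foldC (L : List Char) : ∀ (l : List Char) (d : PySem.Dict Char Int) (c : Char),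
    (l.foldl (pvStepC L) d).getD c 0 =
      if d.contains c = false ∧ c ∈ l then ((pvGrow L c 1 : Nat) : Int) else d.getD c 0 := by
  intro l
  induction l with
  | nil => intro d c; simp
  | cons k l ih =>
      intro d c
      rw [List.foldl_cons, ih]
      by_cases hdc : d.contains c = true
      · have h1 : (pvStepC L d k).contains c = true := by
          rw [pv_stepC_contains, hdc]; simp
        rw [if_neg (by simp [h1]), if_neg (by simp [hdc]), pv_stepC_getD,
          if_neg (by simp [hdc])]
      · have hdc' : d.contains c = false := by simpa using hdc
        by_cases hck : c = k
        · subst hck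
          have h1 : (pvStepC L d c).contains c = true := by
            rw [pv_stepC_contains]; simp
          rw [if_neg (by simp [h1]), pv_stepC_getD, if_pos ⟨hdc', rfl⟩,
            if_pos ⟨hdc', List.mem_cons_self⟩]
        · have h1 : (pvStepC L d k).contains c = d.contains c := by
            rw [pv_stepC_contains]; simp [hck]
        -- value at c unchanged by the step on k ≠ c
          have h2 : (pvStepC L d k).getD c 0 = d.getD c 0 := by
            rw [pv_stepC_getD, if_neg (by rintro ⟨_, h3⟩; exact hck h3)]
          rw [h1, h2]
          by_cases hcl : c ∈ l
          · rw [if_pos ⟨hdc', hcl⟩, if_pos ⟨hdc', List.mem_cons_of_mem _ hcl⟩]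
          · rw [if_neg (by simp [hcl]), if_neg (by
              rintro ⟨_, hm⟩
              rcases List.mem_cons.mp hm with h | h
              · exact hck h
              · exact hcl h)]

-- ---- the runs' keys are the string's characters, in first-occurrence order ----

theorem pv_update_replicate (s : PySem.Set Char) (c : Char) (h : c ∈ s) :
    ∀ n : Nat, PySem.Set.update s (List.replicate n c) = s := by
  intro n
  induction n with
  | zero => rfl
  | succ n ih =>
      rw [List.replicate_succ, PySem.Set.update_cons, PySem.Set.add_of_mem h, ih]

theorem pv_runs_keys (n : Nat) : ∀ (l : List Char) (acc : PySem.Set Char),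
    l.length ≤ n →
    PySem.Set.update acc ((pvRuns l).map Prod.fst) = PySem.Set.update acc l := by
  induction n with
  | zero =>
      intro l acc hlen
      have hl : l = [] := List.eq_nil_of_length_eq_zero (by omega)
      subst hl; rw [pvRuns_nil]; rfl
  | succ n ih =>
      intro l acc hlen
      match l with
      | [] => rw [pvRuns_nil]; rfl
      | a :: rest =>
          set t := rest.takeWhile (· == a) with ht
          set r := rest.dropWhile (· == a) with hr
          have hsplit : rest = t ++ r := (List.takeWhile_append_dropWhile).symm
          have hruns : pvRuns (a :: rest) = (a, (t.length : Int) + 1) :: pvRuns r := by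
            simp only [pvRuns, ← ht, ← hr]
          have hlenr : r.length ≤ n := by
            have h2 := List.length_dropWhile_le (fun x => x == a) rest
            simp only [List.length_cons] at hlen
            rw [← hr] at h2
            omega
          rw [hruns, List.map_cons, PySem.Set.update_cons, ih r _ hlenr]
          conv_rhs => rw [hsplit]
          rw [PySem.Set.update_cons, PySem.Set.update_append]
          congr 1
          have htrep : t = List.replicate t.length a := pv_takeWhile_replicate rest a
          rw [htrep, pv_update_replicate _ a (by
            rw [PySem.Set.mem_add]; exact Or.inr rfl)]

-- ---- facts about the runs: positivity, realizability, maximality ----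

theorem pv_runs_pos (n : Nat) : ∀ (l : List Char), l.length ≤ n →
    ∀ p ∈ pvRuns l, 1 ≤ p.2 := by
  induction n with
  | zero =>
      intro l hlen p hp
      have hl : l = [] := List.eq_nil_of_length_eq_zero (by omega)
      subst hl
      simp [pvRuns] at hp
  | succ n ih =>
      intro l hlen p hp
      match l with
      | [] => simp [pvRuns] at hp
      | a :: rest =>
          have hruns : pvRuns (a :: rest) =
              (a, ((rest.takeWhile (· == a)).length : Int) + 1) ::
                pvRuns (rest.dropWhile (· == a)) := by
            simp only [pvRuns]
          rw [hruns] at hp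
          rcases List.mem_cons.mp hp with h | h
          · subst h; dsimp only; omega
          · have hlenr : (rest.dropWhile (· == a)).length ≤ n := by
              have h2 := List.length_dropWhile_le (fun x => x == a) rest
              simp only [List.length_cons] at hlen
              omega
            exact ih _ hlenr p h

theorem pv_run_infix (n : Nat) : ∀ (l : List Char), l.length ≤ n →
    ∀ p ∈ pvRuns l, List.replicate p.2.toNat p.1 <:+: l := by
  induction n with
  | zero =>
      intro l hlen p hp
      have hl : l = [] := List.eq_nil_of_length_eq_zero (by omega)
      subst hl
      simp [pvRuns] at hp
  | succ n ih =>
      intro l hlen p hp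
      match l with
      | [] => simp [pvRuns] at hp
      | a :: rest =>
          set t := rest.takeWhile (· == a) with ht
          set r := rest.dropWhile (· == a) with hr
          have hruns : pvRuns (a :: rest) = (a, (t.length : Int) + 1) :: pvRuns r := by
            simp only [pvRuns, ← ht, ← hr]
          rw [hruns] at hp
          rcases List.mem_cons.mp hp with h | h
          · subst h
            dsimp only
            have htoNat : ((t.length : Int) + 1).toNat = t.length + 1 := by omega
            rw [htoNat]
            have htrep : t = List.replicate t.length a := pv_takeWhile_replicate rest a
            have hpre : List.replicate (t.length + 1) a <+: a :: rest := by
              refine ⟨r, ?_⟩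
              rw [List.replicate_succ, ← htrep]
              simp only [List.cons_append]
              rw [List.takeWhile_append_dropWhile]
            exact hpre.isInfix
          · have hlenr : r.length ≤ n := by
              have h2 := List.length_dropWhile_le (fun x => x == a) rest
              simp only [List.length_cons] at hlen
              rw [← hr] at h2
              omega
            have hinf : List.replicate p.2.toNat p.1 <:+: r := ih r hlenr p h
            have hsuf : r <:+ a :: rest :=
              (List.dropWhile_suffix _).trans (List.suffix_cons a rest)
            exact hinf.trans hsuf.isInfix

theorem pv_infix_le_max (n : Nat) : ∀ (l : List Char) (c : Char) (k : Nat),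
    l.length ≤ n → 1 ≤ k → List.replicate k c <:+: l →
    (k : Int) ≤ pvMaxFrom c 0 (pvRuns l) := by
  induction n with
  | zero =>
      intro l c k hlen hk hinf
      have hl : l = [] := List.eq_nil_of_length_eq_zero (by omega)
      subst hl
      have := hinf.length_le
      simp only [List.length_replicate, List.length_nil] at this
      omega
  | succ n ih =>
      intro l c k hlen hk hinf
      match l with
      | [] =>
          have := hinf.length_le
          simp only [List.length_replicate, List.length_nil] at this
          omega
      | a :: rest =>
          set t := rest.takeWhile (· == a) with ht
          set r := rest.dropWhile (· == a) with hr
          have hsplit : rest = t ++ r := (List.takeWhile_append_dropWhile).symm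
          have htrep : t = List.replicate t.length a := pv_takeWhile_replicate rest a
          set m := t.length + 1 with hm
          have hlrep : a :: rest = List.replicate m a ++ r := by
            rw [hm, List.replicate_succ, ← htrep]
            simp only [List.cons_append]
            rw [← hsplit]
          have hruns : pvRuns (a :: rest) = (a, (t.length : Int) + 1) :: pvRuns r := by
            simp only [pvRuns, ← ht, ← hr]
          have hlenr : r.length ≤ n := by
            have h2 := List.length_dropWhile_le (fun x => x == a) rest
            simp only [List.length_cons] at hlen
            rw [← hr] at h2
            omega
          have hMrest0 : (0 : Int) ≤ pvMaxFrom c 0 (pvRuns r) := pvMaxFrom_init_le c _ 0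
          -- unfold the max over the cons
          have hMcons : pvMaxFrom c 0 (pvRuns (a :: rest)) =
              if a = c then max ((t.length : Int) + 1) (pvMaxFrom c 0 (pvRuns r))
              else pvMaxFrom c 0 (pvRuns r) := by
            rw [hruns, pvMaxFrom_cons]
            dsimp only
            by_cases hac : a = c
            · rw [if_pos hac, if_pos hac]
              have h0 : max (0 : Int) ((t.length : Int) + 1) = max ((t.length : Int) + 1) 0 := by omega
              rw [h0, pvMaxFrom_max]
            · rw [if_neg hac, if_neg hac]
          -- head char of r is not a
          have hrhead : ∀ b r', r = b :: r' → b ≠ a := by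
            intro b r' hbr
            have := pv_dropWhile_head (p := (· == a)) (by rw [← hr, hbr])
            simpa using this
          -- decompose the infix
          obtain ⟨u, v, huv⟩ := hinf
          have huv' : u ++ (List.replicate k c ++ v) = List.replicate m a ++ r := by
            rw [← List.append_assoc, huv, hlrep]
          -- helper: if m ≤ u.length then the block lies inside r
          have hinr : m ≤ u.length → List.replicate k c <:+: r := by
            intro hmu
            have hdrop := congrArg (List.drop m) huv'
            rw [List.drop_append_of_le_length hmu,
              List.drop_left' (by rw [List.length_replicate])] at hdrop
            exact ⟨u.drop m, v, by rw [List.append_assoc]; exact hdrop⟩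
          -- helper: if u.length < m then u is a block of a's
          have hurep : u.length < m → u = List.replicate u.length a := by
            intro hum
            have htake := congrArg (List.take u.length) huv'
            rw [List.take_left' rfl,
              List.take_append_of_le_length (by rw [List.length_replicate]; omega),
              List.take_replicate, Nat.min_eq_left (le_of_lt hum)] at htake
            exact htake
          by_cases hac : a = c
          · -- same character: either inside the head run or inside r
            subst hac
            rw [hMcons, if_pos rfl]
            by_cases h1 : u.length + k ≤ m
            · have hkm : k ≤ t.length + 1 := by rw [hm] at h1; omega
              have hki : (k : Int) ≤ (t.length : Int) + 1 := by exact_mod_cast hkm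
              exact le_trans hki (le_max_left _ _)
            · by_cases h2 : m ≤ u.length
              · have := ih r a k hlenr hk (hinr h2)
                omega
              · -- u.length < m < u.length + k : then r would start with a
                exfalso
                have hum : u.length < m := by omega
                rw [hurep hum, ← List.append_assoc, ← List.replicate_add] at huv'
                rw [show u.length + k = m + (u.length + k - m) by omega,
                  List.replicate_add, List.append_assoc] at huv'
                have hveq := List.append_cancel_left huv'
                obtain ⟨j, hjr⟩ : ∃ j, u.length + k - m = j + 1 :=
                  ⟨u.length + k - m - 1, by omega⟩
                rw [hjr, List.replicate_succ, List.cons_append] at hveq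
                exact hrhead a _ hveq.symm rfl
          · -- different character: the block lies inside r
            rw [hMcons, if_neg hac]
            by_cases h2 : m ≤ u.length
            · exact ih r c k hlenr hk (hinr h2)
            · exfalso
              have hum : u.length < m := by omega
              rw [hurep hum] at huv'
              rw [show m = u.length + (m - u.length) by omega, List.replicate_add,
                List.append_assoc] at huv'
              have hveq := List.append_cancel_left huv'
              obtain ⟨j, hjr⟩ : ∃ j, m - u.length = j + 1 := ⟨m - u.length - 1, by omega⟩
              obtain ⟨k', hkr⟩ : ∃ k', k = k' + 1 := ⟨k - 1, by omega⟩
              rw [hjr, hkr, List.replicate_succ, List.replicate_succ,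
                List.cons_append, List.cons_append] at hveq
              have hcae : c = a := by injection hveq
              exact hac hcae.symm

-- ---- the while loop computes exactly the per-character maximum run length ----

theorem pv_grow_eq (l : List Char) (c : Char) (M : Int)
    (hinf : List.replicate M.toNat c <:+: l)
    (hub : ∀ k : Nat, 1 ≤ k → List.replicate k c <:+: l → (k : Int) ≤ M) :
    ∀ (j k : Nat), 1 ≤ k → (k : Int) ≤ M → M.toNat - k ≤ j → pvGrow l c k = M.toNat := by
  intro j
  induction j with
  | zero =>
      intro k hk hkM hjk
      rw [pvGrow]
      split_ifs with h
      · exfalso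
        have hin := (PySem.Chars.isIn_iff_infix _ _).mp h
        have := hub (k + 1) (by omega) hin
        omega
      · omega
  | succ j ih =>
      intro k hk hkM hjk
      rw [pvGrow]
      split_ifs with h
      · have hin := (PySem.Chars.isIn_iff_infix _ _).mp h
        have hk1M := hub (k + 1) (by omega) hin
        exact ih (k + 1) (by omega) hk1M (by omega)
      · -- not infix: k cannot be below M
        by_cases hlt : k < M.toNat
        · exfalso
          have hpre : List.replicate (k + 1) c <+: List.replicate M.toNat c := by
            refine ⟨List.replicate (M.toNat - (k + 1)) c, ?_⟩
            rw [← List.replicate_add]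
            congr 1
            omega
          have : List.replicate (k + 1) c <:+: l := hpre.isInfix.trans hinf
          rw [(PySem.Chars.isIn_iff_infix _ _).mpr this] at h
          exact h rfl
        · omega

theorem pv_grow_spec (l : List Char) (c : Char) (hc : c ∈ l) :
    ((pvGrow l c 1 : Nat) : Int) = pvMaxFrom c 0 (pvRuns l) := by
  set M := pvMaxFrom c 0 (pvRuns l) with hM
  -- c is a key of some run
  have hmemkeys : c ∈ (pvRuns l).map Prod.fst := by
    have h1 := pv_runs_keys l.length l [] le_rfl
    rw [PySem.Set.update_nil_left, PySem.Set.update_nil_left] at h1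
    have := (PySem.Set.mem_ofList _ _).mpr hc
    rw [← h1] at this
    exact (PySem.Set.mem_ofList _ _).mp this
  obtain ⟨p, hp, hpc⟩ := List.mem_map.mp hmemkeys
  have hp1 : 1 ≤ p.2 := pv_runs_pos l.length l le_rfl p hp
  have hM1 : 1 ≤ M := le_trans hp1 (pv_le_maxFrom_of_mem c _ 0 p hp hpc)
  -- M is attained by some run, hence realizable as an infix
  have hinf : List.replicate M.toNat c <:+: l := by
    rcases pvMaxFrom_attained c (pvRuns l) 0 with h | ⟨q, hq, hqc, hqv⟩
    · rw [← hM] at h; omega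
    · rw [← hM] at hqv
      have := pv_run_infix l.length l le_rfl q hq
      rw [hqc, ← hqv] at this
      exact this
  have hub : ∀ k : Nat, 1 ≤ k → List.replicate k c <:+: l → (k : Int) ≤ M :=
    fun k hk h => pv_infix_le_max l.length l c k le_rfl hk h
  have := pv_grow_eq l c M hinf hub M.toNat 1 le_rfl hM1 (by omega)
  rw [this]
  omega

-- ---- the two dicts are equal ----

theorem pv_dict_eq (l : List Char) :
    (pvRuns l).foldl pvStepB PySem.Dict.empty =
      l.foldl (pvStepC l) PySem.Dict.empty := by
  have hpos : ∀ p ∈ pvRuns l, 1 ≤ p.2 := pv_runs_pos l.length l le_rfl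
  have hkA : ((pvRuns l).foldl pvStepB PySem.Dict.empty).keys = PySem.Set.ofList l := by
    rw [pv_keys_foldB _ _ hpos, PySem.Dict.keys_empty, PySem.Set.update_nil_left,
      ← PySem.Set.update_nil_left (xs := l)]
    exact pv_runs_keys l.length l [] le_rfl
  have hkB : (l.foldl (pvStepC l) PySem.Dict.empty).keys = PySem.Set.ofList l := by
    rw [pv_keys_foldC, PySem.Dict.keys_empty, PySem.Set.update_nil_left]
  have hndA : ((pvRuns l).foldl pvStepB PySem.Dict.empty).keys.Nodup :=
    pv_nodup_foldB _ _ PySem.Dict.nodup_keys_empty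
  have hndB : (l.foldl (pvStepC l) PySem.Dict.empty).keys.Nodup :=
    pv_nodup_foldC _ _ _ PySem.Dict.nodup_keys_empty
  apply PySem.Dict.ext
  rw [PySem.Dict.items_eq_map_keys _ hndA 0, PySem.Dict.items_eq_map_keys _ hndB 0,
    hkA, hkB]
  apply List.map_congr_left
  intro k hk
  have hkl : k ∈ l := (PySem.Set.mem_ofList _ _).mp hk
  have hA : ((pvRuns l).foldl pvStepB PySem.Dict.empty).getD k 0 =
      pvMaxFrom k 0 (pvRuns l) := by
    rw [pv_getD_foldB, PySem.Dict.getD_empty]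
  have hB : (l.foldl (pvStepC l) PySem.Dict.empty).getD k 0 =
      ((pvGrow l k 1 : Nat) : Int) := by
    rw [pv_getD_foldC, if_pos ⟨PySem.Dict.contains_empty k, hkl⟩]
  rw [hA, hB, pv_grow_spec l k hkl]

-- ===== VERDICT (by name: the statement is the Claim_ definition above) =====
theorem solution_spec : Claim_equal_solution := by
  intro s _
  unfold Spec_solution solution solution_alt
  rcases hl : s.toList with _ | ⟨c, rest⟩
  · rfl
  · dsimp only
    rw [pvA_dict c rest, pv_dict_eq]
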